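-- pv_equiv track=rewrite | github.com/bostonrobbie/BDR | scripts/backfill_html_batches.py | extract_top_level_objects
-- ===== SOURCE A (Python) =====
-- def extract_top_level_objects(array_text):
--     """Extract top-level { ... } objects from a JS array string, handling nesting."""
--     objects = []
--     i = 0
--     while i < len(array_text):
--         if array_text[i] == '{':
--             depth = 0
--             in_str = False
--             str_char = None
--             start = i
--             for j in range(i, len(array_text)):
--                 c = array_text[j]
--                 if in_str:
--                     if c == '\\' and j + 1 < len(array_text):
--                         j += 1  # skip escaped char (note: for loop still increments)
--                         continue
--                     if c == str_char:
--                         in_str = False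
--                 else:
--                     if c in ('"', "'", '`'):
--                         in_str = True
--                         str_char = c
--                     elif c == '{':
--                         depth += 1
--                     elif c == '}':
--                         depth -= 1
--                         if depth == 0:
--                             objects.append(array_text[start:j + 1])
--                             i = j + 1
--                             break
--             else:
--                 break
--         else:
--             i += 1
--     return objects
-- ===== SOURCE B (Python) =====
-- def extract_top_level_objects(array_text):
--     """Extract top-level { ... } objects in one flat pass with a depth/string state machine."""
--     objects = []
--     depth = 0
--     in_str = False
--     str_char = None
--     start = 0
--     for i, c in enumerate(array_text):
--         if depth == 0:
--             if c == '{':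
--                 depth = 1
--                 in_str = False
--                 str_char = None
--                 start = i
--         elif in_str:
--             if c == str_char:
--                 in_str = False
--         elif c in ('"', "'", '`'):
--             in_str = True
--             str_char = c
--         elif c == '{':
--             depth += 1
--         elif c == '}':
--             depth -= 1
--             if depth == 0:
--                 objects.append(array_text[start:i + 1])
--     return objects
-- ===== Notes on version B (the rewrite author's own statement) =====
-- stated objective: simpler
-- what changed: Replaced A's nested loops (outer index scan restarting an inner for-else object scan at each top-level '{') by a single flat pass maintaining a depth/in-string state machine, appending a slice whenever depth returns to zero; A's dead backslash branch disappears.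
import Mathlib
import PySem

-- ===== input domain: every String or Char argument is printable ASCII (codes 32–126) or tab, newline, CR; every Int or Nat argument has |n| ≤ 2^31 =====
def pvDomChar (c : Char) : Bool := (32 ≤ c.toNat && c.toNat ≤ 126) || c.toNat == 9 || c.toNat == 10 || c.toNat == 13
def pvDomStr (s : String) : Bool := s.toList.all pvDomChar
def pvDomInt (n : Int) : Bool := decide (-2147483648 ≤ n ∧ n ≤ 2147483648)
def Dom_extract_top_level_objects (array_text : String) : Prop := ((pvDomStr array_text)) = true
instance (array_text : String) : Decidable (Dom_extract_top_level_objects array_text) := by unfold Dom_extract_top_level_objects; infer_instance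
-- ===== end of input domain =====

-- B replaces A's nested loops (an outer scan restarting an inner for-else object scan at every
-- top-level '{') by one flat pass with a depth/in-string state machine; same return value,
-- objective: simpler.

-- ===== PORT A =====
-- Inner `for j in range(i, len(array_text))` scan of A, walking the suffix `cs = s.drop j` while
-- carrying the index j; `cs = []` is exactly `j < len` failing (the for loop runs to completion,
-- its `else:` fires and breaks the outer while → `none`); `rest ≠ []` is exactly Python's
-- `j + 1 < len(array_text)`; `some (obj, i')` = object appended, outer i set to i'.
-- A's backslash branch `j += 1; continue` is transliterated as the recursive call with unchanged
-- state: Python's `for` rebinds j on the next iteration, so the `j += 1` has no further effect.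
def pvInnerA (s : List Char) (start : Nat) :
    List Char → Nat → Int → Bool → Option Char → Option (List Char × Nat)
  | [], _, _, _, _ => none
  | c :: rest, j, depth, in_str, str_char =>
    if in_str then
      if c = '\\' ∧ rest ≠ [] then
        pvInnerA s start rest (j + 1) depth in_str str_char
      else if some c = str_char then
        pvInnerA s start rest (j + 1) depth false str_char
      else
        pvInnerA s start rest (j + 1) depth in_str str_char
    else
      if c = '"' ∨ c = '\'' ∨ c = '`' then
        pvInnerA s start rest (j + 1) depth true (some c)
      else if c = '{' then
        pvInnerA s start rest (j + 1) (depth + 1) in_str str_char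
      else if c = '}' then
        if depth - 1 = 0 then
          -- array_text[start:j+1] with 0 ≤ start ≤ j+1 ≤ len: exactly drop/take
          some ((s.drop start).take (j + 1 - start), j + 1)
        else
          pvInnerA s start rest (j + 1) (depth - 1) in_str str_char
      else
        pvInnerA s start rest (j + 1) depth in_str str_char

-- Outer `while i < len(array_text)` loop of A, carrying the accumulator `objects`; matching
-- `s.drop i` against `[]` is exactly the `i < len` guard failing, and `c` is array_text[i].
-- Each iteration strictly increases i, so `fuel = len(array_text)` covers every iteration the
-- while loop performs: when fuel reaches 0, i ≥ len already and the Python loop has ended too.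
def pvOuterA (s : List Char) : Nat → Nat → List (List Char) → List (List Char)
  | 0, _, acc => acc
  | fuel + 1, i, acc =>
    match s.drop i with
    | [] => acc
    | c :: _ =>
      if c = '{' then
        match pvInnerA s i (s.drop i) i 0 false none with
        | some oi => pvOuterA s fuel oi.2 (acc ++ [oi.1])
        | none => acc
      else pvOuterA s fuel (i + 1) acc

def extract_top_level_objects (array_text : String) : List String :=
  (pvOuterA array_text.toList array_text.toList.length 0 []).map String.ofList

-- ===== PORT B =====
-- B's single flat pass: one state machine over the characters (suffix walk carrying the index i).
def pvFlatB (s : List Char) :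
    List Char → Nat → Int → Bool → Option Char → Nat → List (List Char) → List (List Char)
  | [], _, _, _, _, _, acc => acc
  | c :: rest, i, depth, in_str, str_char, start, acc =>
    if depth = 0 then
      if c = '{' then pvFlatB s rest (i + 1) 1 false none i acc
      else pvFlatB s rest (i + 1) depth in_str str_char start acc
    else if in_str then
      if some c = str_char then pvFlatB s rest (i + 1) depth false str_char start acc
      else pvFlatB s rest (i + 1) depth in_str str_char start acc
    else if c = '"' ∨ c = '\'' ∨ c = '`' then
      pvFlatB s rest (i + 1) depth true (some c) start acc
    else if c = '{' then
      pvFlatB s rest (i + 1) (depth + 1) in_str str_char start acc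
    else if c = '}' then
      if depth = 1 then
        pvFlatB s rest (i + 1) 0 in_str str_char start (acc ++ [(s.drop start).take (i + 1 - start)])
      else pvFlatB s rest (i + 1) (depth - 1) in_str str_char start acc
    else
      pvFlatB s rest (i + 1) depth in_str str_char start acc

def extract_top_level_objects_alt (array_text : String) : List String :=
  (pvFlatB array_text.toList array_text.toList 0 0 false none 0 []).map String.ofList

-- ===== PRECONDITION & SPEC =====
def Spec_extract_top_level_objects (array_text : String) (out : List String) : Prop := out = extract_top_level_objects_alt array_text
instance (array_text : String) (out : List String) : Decidable (Spec_extract_top_level_objects array_text out) := by unfold Spec_extract_top_level_objects; infer_instance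

-- ===== CLAIM (what is proved, stated in full; the proofs are below) =====
def Claim_equal_extract_top_level_objects : Prop := ∀ (array_text : String), Dom_extract_top_level_objects array_text → Spec_extract_top_level_objects array_text (extract_top_level_objects array_text)

-- ===== LEMMAS AND PROOFS =====

-- Joint simulation along the suffix cs = s.drop i: at depth 0 the flat pass is the outer loop
-- (for any sufficient fuel); at depth ≥ 1 it is the inner scan continued by the outer loop on
-- the inner scan's outcome.  The reachability invariant `in_str = true → str_char ≠ '\\'`
-- (strings only ever open on " ' `) makes A's backslash-first branch order coincide with B's
-- close-quote test.
theorem pvSim (s : List Char) :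
    ∀ (cs : List Char) (i : Nat), s.drop i = cs →
      ((∀ (fuel : Nat) (b : Bool) (sc : Option Char) (st : Nat) (acc : List (List Char)),
          s.length ≤ i + fuel →
          pvFlatB s cs i 0 b sc st acc = pvOuterA s fuel i acc) ∧
       (∀ (fuel : Nat) (depth : Int) (b : Bool) (sc : Option Char) (st : Nat)
          (acc : List (List Char)),
          1 ≤ depth → (b = true → sc ≠ some '\\') → s.length ≤ i + fuel →
          pvFlatB s cs i depth b sc st acc =
            match pvInnerA s st cs i depth b sc with
            | some oi => pvOuterA s fuel oi.2 (acc ++ [oi.1])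
            | none => acc)) := by
  intro cs
  induction cs with
  | nil =>
    intro i hcs
    refine ⟨fun fuel b sc st acc hf => ?_, fun fuel depth b sc st acc hd hsc hf => ?_⟩
    · cases fuel with
      | zero => simp [pvFlatB, pvOuterA]
      | succ f => simp [pvFlatB, pvOuterA, hcs]
    · simp [pvFlatB, pvInnerA]
  | cons c rest ih =>
    intro i hcs
    have hrest : s.drop (i + 1) = rest := by
      rw [← List.tail_drop, hcs]; rfl
    have ih' := ih (i + 1) hrest
    have hlen : i < s.length := by
      by_contra h
      rw [List.drop_eq_nil_of_le (by omega)] at hcs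
      cases hcs
    refine ⟨fun fuel b sc st acc hf => ?_, fun fuel depth b sc st acc hd hsc hf => ?_⟩
    · -- depth 0: only '{' matters
      cases fuel with
      | zero => omega
      | succ f =>
        rw [pvFlatB, pvOuterA, hcs, if_pos rfl]
        by_cases hc : c = '{'
        · rw [if_pos hc]
          simp only [if_pos hc]
          -- one step of the inner scan at j = i, depth 0, on the '{' itself
          rw [pvInnerA, if_neg (show ¬(false = true) from by simp),
            if_neg (show ¬(c = '"' ∨ c = '\'' ∨ c = '`') from by simp [hc]), if_pos hc]
          rw [show (0 : Int) + 1 = 1 from rfl]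
          exact ih'.2 f 1 false none i acc (by omega) (by simp) (by omega)
        · rw [if_neg hc]
          simp only [if_neg hc]
          exact ih'.1 f b sc st acc (by omega)
    · -- depth ≥ 1: lock-step with the inner scan
      rw [pvFlatB, pvInnerA, if_neg (show ¬depth = 0 from by omega)]
      by_cases hb : b = true
      · subst hb
        rw [if_pos rfl, if_pos rfl]
        by_cases hcs' : some c = sc
        · have hnb : ¬(c = '\\' ∧ rest ≠ []) := by
            intro ⟨he, _⟩
            exact hsc rfl (by rw [← hcs', he])
          rw [if_pos hcs', if_neg hnb, if_pos hcs']
          exact ih'.2 fuel depth false sc st acc hd (by simp) (by omega)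
        · rw [if_neg hcs']
          by_cases hbs : c = '\\' ∧ rest ≠ []
          · rw [if_pos hbs]
            exact ih'.2 fuel depth true sc st acc hd hsc (by omega)
          · rw [if_neg hbs, if_neg hcs']
            exact ih'.2 fuel depth true sc st acc hd hsc (by omega)
      · simp only [Bool.not_eq_true] at hb
        subst hb
        rw [if_neg (show ¬(false = true) from by simp),
          if_neg (show ¬(false = true) from by simp)]
        by_cases hq : c = '"' ∨ c = '\'' ∨ c = '`'
        · rw [if_pos hq, if_pos hq]
          refine ih'.2 fuel depth true (some c) st acc hd (fun _ hh => ?_) (by omega)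
          injection hh with hh
          rcases hq with h | h | h <;> rw [h] at hh <;> exact absurd hh (by decide)
        · rw [if_neg hq, if_neg hq]
          by_cases ho : c = '{'
          · rw [if_pos ho, if_pos ho]
            exact ih'.2 fuel (depth + 1) false sc st acc (by omega) (by simp) (by omega)
          · rw [if_neg ho, if_neg ho]
            by_cases hcl : c = '}'
            · rw [if_pos hcl, if_pos hcl]
              by_cases h1 : depth = 1
              · subst h1
                rw [if_pos rfl, if_pos (show (1 : Int) - 1 = 0 from rfl)]
                rw [ih'.1 fuel false sc st (acc ++ [(s.drop st).take (i + 1 - st)]) (by omega)]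
              · rw [if_neg h1, if_neg (show ¬depth - 1 = 0 from by omega)]
                exact ih'.2 fuel (depth - 1) false sc st acc (by omega) (by simp) (by omega)
            · rw [if_neg hcl, if_neg hcl]
              exact ih'.2 fuel depth false sc st acc hd (by simp) (by omega)

-- ===== VERDICT (by name: the statement is the Claim_ definition above) =====
theorem extract_top_level_objects_spec : Claim_equal_extract_top_level_objects := by
  intro s _
  unfold Spec_extract_top_level_objects extract_top_level_objects extract_top_level_objects_alt
  rw [(pvSim s.toList s.toList 0 rfl).1 s.toList.length false none 0 [] (by omega)]
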